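-- pv_equiv track=rewrite | github.com/kajyuuen/funer | tests/converters/test_span_labels_to_sequence_label_converter.py | rebuild_text
-- ===== SOURCE A (Python) =====
-- from typing import List, Optional
--
-- def rebuild_text(text: str,
--                  tokens: List[str],
--                  charid_to_tokenid: List[Optional[int]]) -> str:
--     rebuilded_text = ""
--     prev_token_id = None
--     token_char_i = 0
--     for i in range(len(text)):
--         token_id = charid_to_tokenid[i]
--
--         if prev_token_id == token_id:
--             token_char_i += 1
--         else:
--             token_char_i = 0
--
--         if token_id is not None:
--             rebuilded_text += tokens[token_id][token_char_i]
--         else: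
--             rebuilded_text += " "
--         prev_token_id = token_id
--     return rebuilded_text
-- ===== SOURCE B (Python) =====
-- from typing import List, Optional
--
-- def rebuild_text(text: str,
--                  tokens: List[str],
--                  charid_to_tokenid: List[Optional[int]]) -> str:
--     out = []
--     n = len(text)
--     i = 0
--     while i < n:
--         tid = charid_to_tokenid[i]
--         j = i
--         while j < n and charid_to_tokenid[j] == tid:
--             j += 1
--         if tid is None:
--             out.append(" " * (j - i))
--         else:
--             tok = tokens[tid]
--             out.append("".join([tok[k] for k in range(j - i)]))
--         i = j
--     return "".join(out)
-- ===== Notes on version B (the rewrite author's own statement) =====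
-- stated objective: alternative
-- what changed: B rebuilds the text run by run: it groups consecutive equal entries of charid_to_tokenid into maximal blocks and emits one chunk per block (spaces for None, a prefix of the token otherwise), instead of A's single character-at-a-time loop tracking prev_token_id/token_char_i state.
import Mathlib
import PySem

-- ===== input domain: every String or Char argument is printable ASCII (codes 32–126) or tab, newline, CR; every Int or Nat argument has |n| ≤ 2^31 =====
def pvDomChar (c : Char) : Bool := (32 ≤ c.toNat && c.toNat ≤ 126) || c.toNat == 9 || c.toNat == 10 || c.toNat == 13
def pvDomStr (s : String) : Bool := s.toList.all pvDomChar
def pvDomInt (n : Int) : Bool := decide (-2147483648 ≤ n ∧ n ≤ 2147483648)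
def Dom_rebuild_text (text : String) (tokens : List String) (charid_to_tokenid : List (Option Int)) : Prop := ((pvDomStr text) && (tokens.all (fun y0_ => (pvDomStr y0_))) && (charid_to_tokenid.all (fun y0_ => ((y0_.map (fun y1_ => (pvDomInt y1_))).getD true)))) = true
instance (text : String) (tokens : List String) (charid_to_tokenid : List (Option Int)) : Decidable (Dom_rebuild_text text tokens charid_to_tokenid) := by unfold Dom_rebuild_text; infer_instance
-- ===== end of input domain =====

-- B rebuilds the text run by run (one chunk per maximal constant block of charid_to_tokenid)
-- instead of A's single character loop with prev_token_id/token_char_i state; objective: alternative decomposition, same cost.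

-- ===== PORT A =====
-- state = (accumulated chars, prev_token_id, token_char_i); none = an IndexError has occurred
def aStep (tokens : List String) (charid_to_tokenid : List (Option Int))
    (st : Option (List Char × Option Int × Nat)) (i : Nat) : Option (List Char × Option Int × Nat) :=
  match st with
  | none => none
  | some (acc, prev, ci) =>
    match PySem.List.pyGet? charid_to_tokenid (Int.ofNat i) with
    | none => none
    | some tid =>
      let ci' := if prev == tid then ci + 1 else 0
      match tid with
      | none => some (acc ++ [' '], tid, ci')
      | some t =>
        match PySem.List.pyGet? tokens t with
        | none => none
        | some tok =>
          match PySem.List.pyGet? tok.toList (Int.ofNat ci') with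
          | none => none
          | some c => some (acc ++ [c], tid, ci')

def rebuild_text (text : String) (tokens : List String) (charid_to_tokenid : List (Option Int)) : String :=
  match (List.range text.toList.length).foldl (aStep tokens charid_to_tokenid)
      (some (([] : List Char), (none : Option Int), (0 : Nat))) with
  | some (acc, _, _) => String.ofList acc
  | none => ""   -- unreachable under Pre_ (Python raises IndexError there)

-- ===== PORT B =====
-- end index of the maximal run of value tid starting at j (B's inner while loop;
-- fuel = n - j makes the recursion structural, the loop itself is unchanged)
def runEnd (charid_to_tokenid : List (Option Int)) (n : Nat) (tid : Option Int) :
    Nat → Nat → Nat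
  | 0, j => j
  | fuel + 1, j =>
    if j < n ∧ charid_to_tokenid.getD j none == tid then
      runEnd charid_to_tokenid n tid fuel (j + 1)
    else j

-- B's outer while loop; each iteration appends one chunk (one run) to out
-- (fuel = n - i bounds the remaining iterations, the loop body is B's)
def bLoop (tokens : List String) (charid_to_tokenid : List (Option Int)) (n : Nat) :
    Nat → Nat → List (List Char) → List (List Char)
  | 0, _, out => out
  | fuel + 1, i, out =>
    if i < n then
      let tid := charid_to_tokenid.getD i none
      let j := runEnd charid_to_tokenid n tid (n - i) i
      let chunk : List Char :=
        match tid with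
        | none => List.replicate (j - i) ' '
        | some t => (List.range (j - i)).map
            (fun k => (((PySem.List.pyGet? tokens t).getD "").toList.getD k ' '))
      bLoop tokens charid_to_tokenid n fuel j (out ++ [chunk])
    else out

def rebuild_text_alt (text : String) (tokens : List String) (charid_to_tokenid : List (Option Int)) : String :=
  String.ofList (bLoop tokens charid_to_tokenid text.toList.length
    text.toList.length 0 []).flatten

-- ===== PRECONDITION & SPEC =====
-- rpA l i = A's token_char_i at position i: the run position of i in l (with A's harmless
-- quirk that an initial None run starts at 1, since prev_token_id is initialised to None)
def rpA (l : List (Option Int)) : Nat → Nat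
  | 0 => if l.getD 0 none == (none : Option Int) then 1 else 0
  | (i + 1) => if l.getD i none == l.getD (i + 1) none then rpA l i + 1 else 0

-- position i is readable: its token id (if any) indexes tokens (Python negative indexing
-- included) and the run position indexes that token
def okAt (tokens : List String) (l : List (Option Int)) (i : Nat) : Bool :=
  match l.getD i none with
  | none => true
  | some t =>
    match PySem.List.pyGet? tokens t with
    | none => false
    | some tok => rpA l i < tok.toList.length

-- Pre_ = exactly the inputs where Python A returns (no IndexError): the mapping covers the
-- text and every position is readable
def Pre_rebuild_text (text : String) (tokens : List String) (charid_to_tokenid : List (Option Int)) : Prop :=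
  text.toList.length ≤ charid_to_tokenid.length ∧
    ∀ i ∈ List.range text.toList.length, okAt tokens charid_to_tokenid i = true

instance (text : String) (tokens : List String) (charid_to_tokenid : List (Option Int)) :
    Decidable (Pre_rebuild_text text tokens charid_to_tokenid) := by
  unfold Pre_rebuild_text; infer_instance

def pvWitness_rebuild_text : String × List String × List (Option Int) :=
  ("ab c", ["ab", "c"], [some 0, some 0, none, some 1])

def Spec_rebuild_text (text : String) (tokens : List String) (charid_to_tokenid : List (Option Int)) (out : String) : Prop := out = rebuild_text_alt text tokens charid_to_tokenid
instance (text : String) (tokens : List String) (charid_to_tokenid : List (Option Int)) (out : String) : Decidable (Spec_rebuild_text text tokens charid_to_tokenid out) := by unfold Spec_rebuild_text; infer_instance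

-- ===== CLAIM (what is proved, stated in full; the proofs are below) =====
def Claim_equal_rebuild_text : Prop := ∀ (text : String) (tokens : List String) (charid_to_tokenid : List (Option Int)), Dom_rebuild_text text tokens charid_to_tokenid → Pre_rebuild_text text tokens charid_to_tokenid → Spec_rebuild_text text tokens charid_to_tokenid (rebuild_text text tokens charid_to_tokenid)

-- ===== LEMMAS AND PROOFS =====
-- the character both programs produce at position i
def fCh (tokens : List String) (l : List (Option Int)) (i : Nat) : Char :=
  match l.getD i none with
  | none => ' '
  | some t => ((PySem.List.pyGet? tokens t).getD "").toList.getD (rpA l i) ' '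

theorem ci_step (l : List (Option Int)) (m : Nat) :
    (if ((if m = 0 then (none : Option Int) else l.getD (m - 1) none) == l.getD m none)
      then (if m = 0 then 0 else rpA l (m - 1)) + 1 else 0) = rpA l m := by
  cases m with
  | zero =>
    have e : l[0]?.getD none = l.getD 0 none := rfl
    cases h : l.getD 0 none <;> rw [h] at e <;> simp [rpA, e]
  | succ m => simp [rpA]

theorem A_inv (tokens : List String) (l : List (Option Int)) (N : Nat)
    (hlen : N ≤ l.length) (hok : ∀ i ∈ List.range N, okAt tokens l i = true) :
    ∀ m, m ≤ N → (List.range m).foldl (aStep tokens l)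
        (some (([] : List Char), (none : Option Int), (0 : Nat))) =
      some ((List.range m).map (fCh tokens l),
        (if m = 0 then none else l.getD (m - 1) none),
        (if m = 0 then 0 else rpA l (m - 1))) := by
  intro m
  induction m with
  | zero => intro _; simp
  | succ m ih =>
    intro hm
    rw [List.range_succ, List.foldl_append, ih (by omega), List.map_append]
    have hml : m < l.length := by omega
    have h1 : PySem.List.pyGet? l (Int.ofNat m) = some (l.getD m none) := by
      rw [show (Int.ofNat m) = ((m : Nat) : Int) from rfl, PySem.List.pyGet?_natCast]
      simp [List.getD, List.getElem?_eq_getElem hml]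
    have hokm := hok m (by simp; omega)
    simp only [List.foldl_cons, List.foldl_nil, aStep, h1]
    rw [ci_step]
    have h2' : l[m]?.getD none = l.getD m none := rfl
    cases h2 : l.getD m none with
    | none =>
      rw [h2] at h2'
      simp [fCh, List.getD, h2']
    | some t =>
      rw [h2] at h2'
      have hokm' : (match PySem.List.pyGet? tokens t with
          | none => false
          | some tok => decide (rpA l m < tok.toList.length)) = true := by
        simpa [okAt, h2'] using hokm
      cases h3 : PySem.List.pyGet? tokens t with
      | none => rw [h3] at hokm'; simp at hokm'
      | some tok =>
        rw [h3] at hokm'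
        have h4 : rpA l m < tok.toList.length := by simpa using hokm'
        simp [h3, fCh, List.getD, h2', List.getElem?_eq_getElem h4,
          PySem.List.pyGet?_natCast]

theorem runEnd_ge (l : List (Option Int)) (n : Nat) (tid : Option Int) :
    ∀ fuel j, j ≤ runEnd l n tid fuel j := by
  intro fuel
  induction fuel with
  | zero => intro j; simp [runEnd]
  | succ fuel ih =>
    intro j
    rw [runEnd]
    split
    · exact le_trans (by omega) (ih (j + 1))
    · exact le_rfl

theorem lt_runEnd_self (l : List (Option Int)) (n : Nat) (i : Nat) (h : i < n) :
    i < runEnd l n (l.getD i none) (n - i) i := by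
  rw [show n - i = (n - i - 1) + 1 from by omega, runEnd, if_pos ⟨h, by simp⟩]
  exact lt_of_lt_of_le (by omega) (runEnd_ge l n _ _ (i + 1))

theorem runEnd_le (l : List (Option Int)) (n : Nat) (tid : Option Int) :
    ∀ fuel j, j ≤ n → runEnd l n tid fuel j ≤ n := by
  intro fuel
  induction fuel with
  | zero => intro j h; simpa [runEnd] using h
  | succ fuel ih =>
    intro j h
    rw [runEnd]
    split
    · next hc => exact ih (j + 1) (by omega)
    · exact h

theorem runEnd_run (l : List (Option Int)) (n : Nat) (tid : Option Int) :
    ∀ fuel j k, j ≤ k → k < runEnd l n tid fuel j → l.getD k none = tid := by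
  intro fuel
  induction fuel with
  | zero => intro j k hk1 hk2; simp [runEnd] at hk2; omega
  | succ fuel ih =>
    intro j k hk1 hk2
    rw [runEnd] at hk2
    split at hk2
    · next hc =>
      rcases Nat.eq_or_lt_of_le hk1 with rfl | hk1
      · exact eq_of_beq hc.2
      · exact ih (j + 1) k hk1 hk2
    · omega

theorem runEnd_stop (l : List (Option Int)) (n : Nat) (tid : Option Int) :
    ∀ fuel j, n - j ≤ fuel → runEnd l n tid fuel j < n →
      l.getD (runEnd l n tid fuel j) none ≠ tid := by
  intro fuel
  induction fuel with
  | zero =>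
    intro j hf h
    rw [runEnd] at h ⊢
    omega
  | succ fuel ih =>
    intro j hf h
    rw [runEnd] at h ⊢
    split at h
    · next hc =>
      rw [if_pos hc]
      exact ih (j + 1) (by omega) h
    · next hc =>
      rw [if_neg hc]
      intro he
      exact hc ⟨h, by rw [he]; simp⟩

theorem rpA_start (l : List (Option Int)) (i : Nat) (t : Int)
    (hstart : i = 0 ∨ l.getD (i - 1) none ≠ l.getD i none)
    (ht : l.getD i none = some t) : rpA l i = 0 := by
  cases i with
  | zero => simp only [rpA]; rw [ht]; simp
  | succ i =>
    rcases hstart with h | h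
    · omega
    · simp only [rpA]
      rw [if_neg]
      simpa using h

theorem B_inv (tokens : List String) (l : List (Option Int)) (n : Nat) :
    ∀ fuel i, n - i ≤ fuel → i ≤ n →
      (i = 0 ∨ i = n ∨ l.getD (i - 1) none ≠ l.getD i none) →
      ∀ out, (bLoop tokens l n fuel i out).flatten =
        out.flatten ++ (List.range' i (n - i)).map (fCh tokens l) := by
  intro fuel
  induction fuel with
  | zero =>
    intro i hf hin hstart out
    rw [show n - i = 0 from by omega]
    simp [bLoop]
  | succ fuel ih =>
    intro i hf hin hstart out
    rw [bLoop]
    by_cases h : i < n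
    · rw [if_pos h]
      have hstart' : i = 0 ∨ l.getD (i - 1) none ≠ l.getD i none := by
        rcases hstart with h' | h' | h' <;> [exact Or.inl h'; omega; exact Or.inr h']
      have hij : i < runEnd l n (l.getD i none) (n - i) i := lt_runEnd_self l n i h
      have hjn : runEnd l n (l.getD i none) (n - i) i ≤ n :=
        runEnd_le l n _ (n - i) i (by omega)
      set j := runEnd l n (l.getD i none) (n - i) i with hj
      have hrun : ∀ k, i ≤ k → k < j → l.getD k none = l.getD i none :=
        runEnd_run l n _ (n - i) i
      have hchunk : (match l.getD i none with
          | none => List.replicate (j - i) ' '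
          | some t => (List.range (j - i)).map
              (fun k => (((PySem.List.pyGet? tokens t).getD "").toList.getD k ' '))) =
          (List.range' i (j - i)).map (fCh tokens l) := by
        cases ht : l.getD i none with
        | none =>
          rw [eq_comm, List.eq_replicate_iff]
          constructor
          · simp
          · intro b hb
            simp only [List.mem_map, List.mem_range'_1] at hb
            obtain ⟨k, ⟨hk1, hk2⟩, rfl⟩ := hb
            have hv := hrun k hk1 (by omega)
            rw [ht] at hv
            have e : l[k]?.getD none = none := by
              rw [show l[k]?.getD none = l.getD k none from rfl, hv]
            simp [fCh, e]
        | some t =>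
          have hrp : ∀ k, k < j - i → rpA l (i + k) = k := by
            intro k
            induction k with
            | zero =>
              intro _
              exact rpA_start l i t hstart' ht
            | succ k ihk =>
              intro hk
              have e1 : l.getD (i + k) none = l.getD i none := hrun _ (by omega) (by omega)
              have e2 : l.getD (i + (k + 1)) none = l.getD i none := hrun _ (by omega) (by omega)
              have e3 : i + (k + 1) = (i + k) + 1 := by omega
              rw [e3, rpA, if_pos (by rw [e1, ← e3, e2]; simp), ihk (by omega)]
          rw [List.range'_eq_map_range, List.map_map]
          apply List.map_congr_left
          intro k hk
          simp only [List.mem_range] at hk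
          have hv : l.getD (i + k) none = some t := by
            rw [hrun _ (by omega) (by omega), ht]
          simp only [Function.comp, fCh, hv, hrp k hk]
      have hstartj : j = 0 ∨ j = n ∨ l.getD (j - 1) none ≠ l.getD j none := by
        by_cases hjln : j < n
        · right; right
          have h1 := runEnd_stop l n (l.getD i none) (n - i) i (by omega) (by rw [← hj]; exact hjln)
          rw [← hj] at h1
          have h2 : l.getD (j - 1) none = l.getD i none := hrun (j - 1) (by omega) (by omega)
          rw [h2]
          exact fun hc => h1 hc.symm
        · right; left; omega
      simp only [← hj]
      rw [hchunk]
      rw [ih j (by omega) (by omega) hstartj (out ++ [List.map (fCh tokens l) (List.range' i (j - i))])]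
      rw [List.flatten_append]
      simp only [List.flatten_cons, List.flatten_nil, List.append_nil, List.append_assoc]
      congr 1
      rw [← List.map_append]
      congr 1
      have e := @List.range'_append i (j - i) (n - j) 1
      simp only [one_mul] at e
      rw [show i + (j - i) = j from by omega] at e
      rw [show (j - i) + (n - j) = n - i from by omega] at e
      exact e
    · rw [if_neg h]
      rw [show n - i = 0 from by omega]
      simp

-- ===== VERDICT (by name: the statement is the Claim_ definition above) =====
theorem rebuild_text_spec : Claim_equal_rebuild_text := by
  intro text tokens l _ hpre
  obtain ⟨hlen, hok⟩ := hpre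
  unfold Spec_rebuild_text rebuild_text rebuild_text_alt
  rw [A_inv tokens l text.toList.length hlen hok _ le_rfl]
  rw [B_inv tokens l text.toList.length text.toList.length 0 (by omega) (by omega) (Or.inl rfl) []]
  simp [List.range_eq_range']
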